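-- pv_equiv track=rewrite | github.com/JakeyChen/SlaveDebugTool | main.py | list_str_format
-- ===== SOURCE A (Python) =====
-- def list_str_format(receive_list, lineNum=16, strFormat="str"):
--     '''
--     格式化接收数据，按照自己想要的格式输出
--     '''
--     temp_string = ""
--     if strFormat == "str":
--         for index, item in enumerate(receive_list):
--             item = hex(item)[2:].rjust(2, "0")
--             temp_string += "%-5s" % item
--             if (index + 1) % 16 == 0:
--                 temp_string += "\n"
--         return temp_string
--     else:
--         for index, item in enumerate(receive_list):
--             item = str(item).rjust(3, "0")
--             temp_string += "%-5s" % item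
--             if (index + 1) % 16 == 0:
--                 temp_string += "\n"
--         return temp_string
-- ===== SOURCE B (Python) =====
-- def list_str_format(receive_list, lineNum=16, strFormat="str"):
--     '''
--     格式化接收数据，按照自己想要的格式输出
--     '''
--     if strFormat == "str":
--         fmt = lambda item: "%-5s" % hex(item)[2:].rjust(2, "0")
--     else:
--         fmt = lambda item: "%-5s" % str(item).rjust(3, "0")
--     fields = [fmt(item) for item in receive_list]
--     parts = []
--     for i in range(0, len(fields), 16):
--         chunk = fields[i:i + 16]
--         parts.append("".join(chunk))
--         if len(chunk) == 16:
--             parts.append("\n")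
--     return "".join(parts)
-- ===== Notes on version B (the rewrite author's own statement) =====
-- stated objective: alternative
-- what changed: Replaces the two duplicated enumerate loops with an index%16 newline test by a single formatting pass (formatter picked once from strFormat) followed by explicit 16-element chunk slicing that joins each chunk and appends a newline exactly for full chunks.
import Mathlib
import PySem

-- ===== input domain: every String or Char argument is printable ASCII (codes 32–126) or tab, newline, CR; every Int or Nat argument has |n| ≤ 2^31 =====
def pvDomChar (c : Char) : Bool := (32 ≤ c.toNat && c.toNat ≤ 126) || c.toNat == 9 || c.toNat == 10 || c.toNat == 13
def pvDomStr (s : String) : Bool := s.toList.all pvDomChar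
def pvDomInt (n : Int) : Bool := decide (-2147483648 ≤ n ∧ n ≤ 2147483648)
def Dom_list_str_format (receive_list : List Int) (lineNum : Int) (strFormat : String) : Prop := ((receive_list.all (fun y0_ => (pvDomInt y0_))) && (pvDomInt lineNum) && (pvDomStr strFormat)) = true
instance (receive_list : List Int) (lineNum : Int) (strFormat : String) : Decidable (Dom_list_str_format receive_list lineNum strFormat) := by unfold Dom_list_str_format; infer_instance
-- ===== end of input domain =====

-- B replaces the index%16 newline test by a separate formatting pass plus explicit 16-element
-- chunk slicing (alternative decomposition, same cost); same return value everywhere.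

-- ===== PORT A =====
-- shared formatting helpers (exact ports of the Python field expressions)
-- one hex digit, lowercase (Python hex())
def pvHexDigit (n : Nat) : Char := if n < 10 then Char.ofNat (48 + n) else Char.ofNat (87 + n)

-- hex digits of a nonnegative number, most significant first; hex(0) has digits "0"
def pvNatHex (n : Nat) : List Char :=
  if h : n < 16 then [pvHexDigit n]
  else pvNatHex (n / 16) ++ [pvHexDigit (n % 16)]
  decreasing_by exact Nat.div_lt_self (by omega) (by omega)

-- hex(i)[2:]  (for i < 0, Python gives '-0x…' and [2:] leaves 'x' ++ digits)
def pvHexDrop2 (i : Int) : List Char :=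
  if i < 0 then 'x' :: pvNatHex (-i).toNat else pvNatHex i.toNat

-- s.rjust(w, '0')
def pvRjust0 (w : Nat) (s : List Char) : List Char := List.replicate (w - s.length) '0' ++ s

-- "%-5s" % s
def pvLjust5 (s : List Char) : List Char := s ++ List.replicate (5 - s.length) ' '

-- the two field formatters of A's loop bodies
def pvFmtHex (i : Int) : List Char := pvLjust5 (pvRjust0 2 (pvHexDrop2 i))
def pvFmtDec (i : Int) : List Char := pvLjust5 (pvRjust0 3 (PySem.Int.toChars i))

-- A's loop: temp_string accumulator, newline when (index+1) % 16 == 0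
def pvALoop (fmt : Int → List Char) (l : List Int) (idx : Nat) (acc : List Char) : List Char :=
  match l with
  | [] => acc
  | item :: rest =>
      pvALoop fmt rest (idx + 1)
        (acc ++ fmt item ++ (if (idx + 1) % 16 = 0 then ['\n'] else []))

def list_str_format (receive_list : List Int) (lineNum : Int) (strFormat : String) : String :=
  if strFormat == "str" then String.mk (pvALoop pvFmtHex receive_list 0 [])
  else String.mk (pvALoop pvFmtDec receive_list 0 [])

-- ===== PORT B =====
-- B's chunk loop: for i in range(0, len(fields), 16): join the 16-slice, newline iff full
def pvChunks (fields : List (List Char)) : List Char :=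
  if fields = [] then []
  else
    (List.take 16 fields).flatten
      ++ (if (List.take 16 fields).length = 16 then ['\n'] else [])
      ++ pvChunks (List.drop 16 fields)
  termination_by fields.length
  decreasing_by rename_i h; cases fields with | nil => exact absurd rfl h | cons a t => simp

def list_str_format_alt (receive_list : List Int) (lineNum : Int) (strFormat : String) : String :=
  let fmt := if strFormat == "str" then pvFmtHex else pvFmtDec
  String.mk (pvChunks (receive_list.map fmt))

-- ===== PRECONDITION & SPEC =====
def Spec_list_str_format (receive_list : List Int) (lineNum : Int) (strFormat : String) (out : String) : Prop := out = list_str_format_alt receive_list lineNum strFormat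
instance (receive_list : List Int) (lineNum : Int) (strFormat : String) (out : String) : Decidable (Spec_list_str_format receive_list lineNum strFormat out) := by unfold Spec_list_str_format; infer_instance

-- ===== CLAIM (what is proved, stated in full; the proofs are below) =====
def Claim_equal_list_str_format : Prop := ∀ (receive_list : List Int) (lineNum : Int) (strFormat : String), Dom_list_str_format receive_list lineNum strFormat → Spec_list_str_format receive_list lineNum strFormat (list_str_format receive_list lineNum strFormat)

-- ===== LEMMAS AND PROOFS =====

-- a line-slot counter form common to both loops: k = slots left in the current line (1 ≤ k ≤ 16)
def pvLineFold (fields : List (List Char)) (k : Nat) : List Char :=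
  match fields with
  | [] => []
  | f :: rest => f ++ (if k = 1 then ['\n'] else []) ++ pvLineFold rest (if k = 1 then 16 else k - 1)

theorem pvALoop_eq_lineFold (fmt : Int → List Char) :
    ∀ (l : List Int) (idx : Nat) (acc : List Char),
      pvALoop fmt l idx acc = acc ++ pvLineFold (l.map fmt) (16 - idx % 16) := by
  intro l
  induction l with
  | nil => intro idx acc; simp [pvALoop, pvLineFold]
  | cons x rest ih =>
      intro idx acc
      rw [pvALoop, ih]
      have hr : idx % 16 < 16 := Nat.mod_lt _ (by omega)
      by_cases h15 : idx % 16 = 15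
      · have h1 : (idx + 1) % 16 = 0 := by omega
        have h2 : 16 - idx % 16 = 1 := by omega
        rw [h1, h2, List.map_cons, pvLineFold]
        simp
      · have h1 : (idx + 1) % 16 = idx % 16 + 1 := by omega
        have h2 : 16 - idx % 16 ≠ 1 := by omega
        have h3 : 16 - (idx % 16 + 1) = 16 - idx % 16 - 1 := by omega
        rw [h1, h3, List.map_cons, pvLineFold]
        simp only [if_neg h2]
        simp

theorem pvLineFold_peel (fields : List (List Char)) (k : Nat) (hk1 : 1 ≤ k) :
    pvLineFold fields k =
      (List.take k fields).flatten
        ++ (if (List.take k fields).length = k then ['\n'] else [])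
        ++ pvLineFold (List.drop k fields) 16 := by
  induction fields generalizing k with
  | nil =>
      rw [pvLineFold, List.take_nil, List.drop_nil, pvLineFold]
      rw [if_neg (show ¬(List.length ([] : List (List Char)) = k) by simp; omega)]
      simp
  | cons f rest ih =>
      by_cases h1 : k = 1
      · subst h1
        simp [pvLineFold]
      · have hk2 : 2 ≤ k := by omega
        rw [pvLineFold]
        simp only [if_neg h1]
        have htk : List.take k (f :: rest) = f :: List.take (k - 1) rest := by
          obtain ⟨k', rfl⟩ : ∃ k', k = k' + 1 := ⟨k - 1, by omega⟩
          simp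
        have hdk : List.drop k (f :: rest) = List.drop (k - 1) rest := by
          obtain ⟨k', rfl⟩ : ∃ k', k = k' + 1 := ⟨k - 1, by omega⟩
          simp
        rw [htk, hdk, ih (k - 1) (by omega)]
        have hlen : ((List.take (k - 1) rest).length = k - 1) ↔ ((f :: List.take (k - 1) rest).length = k) := by
          simp; omega
        by_cases hfull : (List.take (k - 1) rest).length = k - 1
        · rw [if_pos hfull, if_pos (hlen.mp hfull)]
          simp
        · rw [if_neg hfull, if_neg (fun h => hfull (hlen.mpr h))]
          simp

theorem pvChunks_eq_lineFold (fields : List (List Char)) :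
    pvChunks fields = pvLineFold fields 16 := by
  induction hn : fields.length using Nat.strong_induction_on generalizing fields with
  | _ n ih =>
      match fields with
      | [] => rw [pvChunks.eq_def]; simp [pvLineFold]
      | f :: rest =>
          rw [pvChunks.eq_def, pvLineFold_peel (f :: rest) 16 (by omega)]
          simp only [reduceCtorEq, if_false, List.append_assoc]
          congr 2
          exact ih (List.drop 16 (f :: rest)).length (by subst hn; simp) _ rfl

theorem pvLoop_eq_chunks (fmt : Int → List Char) (l : List Int) :
    pvALoop fmt l 0 [] = pvChunks (l.map fmt) := by
  rw [pvALoop_eq_lineFold, pvChunks_eq_lineFold]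
  simp

-- ===== VERDICT (by name: the statement is the Claim_ definition above) =====
theorem list_str_format_spec : Claim_equal_list_str_format := by
  intro receive_list lineNum strFormat _
  unfold Spec_list_str_format list_str_format list_str_format_alt
  by_cases h : strFormat == "str" <;> simp [h, pvLoop_eq_chunks]
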